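-- pv_equiv track=rewrite | github.com/DanielHenderson-17/NeuraFormAI_Backend | chat_ui/right/chat_window.py | text_to_phonemes
-- ===== SOURCE A (Python) =====
-- def text_to_phonemes(text):
--     """Convert text to phonemes for lip-sync animation"""
--     # Enhanced phoneme mapping for more natural speech
--     phoneme_map = {
--         'a': 'aa', 'e': 'ee', 'i': 'ih', 'o': 'oh', 'u': 'ou',
--         'A': 'aa', 'E': 'ee', 'I': 'ih', 'O': 'oh', 'U': 'ou',
--         'y': 'ih', 'Y': 'ih'
--     }
--
--     phonemes = []
--     words = text.split()
--
--     for word in words: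
--         word_lower = word.lower()
--         word_phonemes = []
--
--         # Find all vowels in the word for more detailed lip movement
--         for vowel, phoneme in phoneme_map.items():
--             if vowel in word_lower:
--                 word_phonemes.append(phoneme)
--
--         if word_phonemes:
--             # Use the most prominent vowel (usually the first one)
--             phonemes.append(word_phonemes[0])
--             # Add a brief neutral transition for longer words
--             if len(word_phonemes) > 1:
--                 phonemes.append('ih')  # Brief closed mouth
--         else:
--             # If no vowel found, use neutral 'aa'
--             phonemes.append('aa')
--
--     return phonemes
-- ===== SOURCE B (Python) =====
-- VOWEL_PRIORITY = [('a', 'aa'), ('e', 'ee'), ('i', 'ih'), ('o', 'oh'), ('u', 'ou'), ('y', 'ih')]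
--
-- def text_to_phonemes(text):
--     """Convert text to phonemes for lip-sync animation (one pass per word)."""
--     phonemes = []
--     for word in text.split():
--         present = set()
--         for ch in word.lower():
--             if ch in 'aeiouy':
--                 present.add(ch)
--         if not present:
--             phonemes.append('aa')
--         else:
--             for vowel, phoneme in VOWEL_PRIORITY:
--                 if vowel in present:
--                     phonemes.append(phoneme)
--                     break
--             if len(present) >= 2:
--                 phonemes.append('ih')
--     return phonemes
-- ===== Notes on version B (the rewrite author's own statement) =====
-- stated objective: alternative
-- what changed: B inverts the traversal: instead of testing each of the 12 phoneme-map keys as a substring of every word, it makes one pass over the word's lowercased characters collecting the set of vowel letters present, then picks the phoneme by scanning a 6-entry priority list and appends the neutral transition when the set has two or more letters.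
import Mathlib
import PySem

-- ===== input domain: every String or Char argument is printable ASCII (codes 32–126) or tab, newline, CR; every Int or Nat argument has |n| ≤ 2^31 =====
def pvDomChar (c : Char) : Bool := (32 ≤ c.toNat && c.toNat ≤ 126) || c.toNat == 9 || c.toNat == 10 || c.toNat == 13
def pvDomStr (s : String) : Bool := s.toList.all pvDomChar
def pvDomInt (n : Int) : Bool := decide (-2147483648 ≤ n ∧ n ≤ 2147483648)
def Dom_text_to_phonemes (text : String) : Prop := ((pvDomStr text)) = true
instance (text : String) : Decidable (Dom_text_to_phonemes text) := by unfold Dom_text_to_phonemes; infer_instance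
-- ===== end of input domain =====

-- B replaces A's 12 substring scans per word by one pass over the word's characters
-- collecting the set of vowel letters present, then one scan of a 6-entry priority list.

-- ===== PORT A =====
def pvPhonemeMap : PySem.Dict String String := PySem.Dict.ofList
  [("a", "aa"), ("e", "ee"), ("i", "ih"), ("o", "oh"), ("u", "ou"),
   ("A", "aa"), ("E", "ee"), ("I", "ih"), ("O", "oh"), ("U", "ou"),
   ("y", "ih"), ("Y", "ih")]

-- body of A's `for word in words` loop: the one or two phonemes appended for `word`
def pvAWord (word : String) : List String :=
  let wordLower := PySem.Str.lower word
  let wordPhonemes := pvPhonemeMap.items.foldl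
    (fun wp vp => if PySem.Str.isIn vp.1 wordLower then wp ++ [vp.2] else wp) []
  match wordPhonemes with
  | [] => ["aa"]
  | p :: rest => [p] ++ (if 1 < (p :: rest).length then ["ih"] else [])

def text_to_phonemes (text : String) : List String :=
  (PySem.Str.split₀ text).foldl (fun phonemes word => phonemes ++ pvAWord word) []

-- ===== PORT B =====
def pvVowelPriority : List (Char × String) :=
  [('a', "aa"), ('e', "ee"), ('i', "ih"), ('o', "oh"), ('u', "ou"), ('y', "ih")]

-- body of B's `for word` loop; `ch in 'aeiouy'` is char membership, exact for single chars
def pvBWord (word : String) : List String :=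
  let present : PySem.Set Char :=
    (PySem.Str.lower word).toList.foldl
      (fun s ch => if ch ∈ ['a', 'e', 'i', 'o', 'u', 'y'] then s.add ch else s)
      PySem.Set.empty
  if present.isEmpty then ["aa"]
  else
    (match pvVowelPriority.find? (fun vp => present.contains vp.1) with
     | some vp => [vp.2]
     | none => []) ++ (if 2 ≤ present.length then ["ih"] else [])

def text_to_phonemes_alt (text : String) : List String :=
  (PySem.Str.split₀ text).foldl (fun phonemes word => phonemes ++ pvBWord word) []

-- ===== PRECONDITION & SPEC =====
def Spec_text_to_phonemes (text : String) (out : List String) : Prop := out = text_to_phonemes_alt text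
instance (text : String) (out : List String) : Decidable (Spec_text_to_phonemes text out) := by unfold Spec_text_to_phonemes; infer_instance

-- ===== CLAIM (what is proved, stated in full; the proofs are below) =====
def Claim_equal_text_to_phonemes : Prop := ∀ (text : String), Dom_text_to_phonemes text → Spec_text_to_phonemes text (text_to_phonemes text)

-- ===== LEMMAS AND PROOFS =====

-- `[v] in s` (substring) is the same as char membership
lemma pv_isIn_singleton (v : Char) (s : List Char) :
    PySem.Chars.isIn [v] s = s.contains v := by
  rw [Bool.eq_iff_iff, PySem.Chars.isIn_iff_infix, List.contains_iff_mem]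
  constructor
  · intro h
    exact h.sublist.subset (by simp)
  · intro h
    obtain ⟨l1, l2, rfl⟩ := List.append_of_mem h
    exact ⟨l1, l2, by simp⟩

-- lowercasing never yields an uppercase ASCII letter
lemma pv_upper_contains_false (C : Char) (hC : PySem.Chars.isupper C = true) (l : List Char) :
    (PySem.Chars.lower l).contains C = false := by
  rw [Bool.eq_false_iff]
  intro h
  rw [List.contains_iff_mem] at h
  simp only [PySem.Chars.lower, List.mem_map] at h
  obtain ⟨c, -, hlc⟩ := h
  simp only [PySem.Chars.isupper, Bool.and_eq_true, decide_eq_true_eq] at hC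
  have hCa : 65 ≤ C.toNat := by
    have := hC.1; rw [Char.le_def, UInt32.le_iff_toNat_le] at this; simpa using this
  have hCz : C.toNat ≤ 90 := by
    have := hC.2; rw [Char.le_def, UInt32.le_iff_toNat_le] at this; simpa using this
  unfold PySem.Chars.lowerChar at hlc
  by_cases hu : PySem.Chars.isupper c = true
  · rw [if_pos hu] at hlc
    simp only [PySem.Chars.isupper, Bool.and_eq_true, decide_eq_true_eq] at hu
    have h1 : 65 ≤ c.toNat := by
      have := hu.1; rw [Char.le_def, UInt32.le_iff_toNat_le] at this; simpa using this
    have h2 : c.toNat ≤ 90 := by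
      have := hu.2; rw [Char.le_def, UInt32.le_iff_toNat_le] at this; simpa using this
    have h3 : C.toNat = c.toNat + 32 := by
      have h4 : (c.toNat + 32).isValidChar := by
        left; omega
      rw [← hlc, Char.toNat_ofNat, if_pos h4]
    omega
  · rw [if_neg hu] at hlc
    rw [hlc] at hu
    simp only [PySem.Chars.isupper, Bool.and_eq_true, decide_eq_true_eq] at hu
    apply hu
    constructor
    · rw [Char.le_def, UInt32.le_iff_toNat_le]; simpa using hCa
    · rw [Char.le_def, UInt32.le_iff_toNat_le]; simpa using hCz

-- a fold that conditionally adds is the set of the filtered list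
lemma pv_fold_filter (l : List Char) (p : Char → Prop) [DecidablePred p] (s : PySem.Set Char) :
    l.foldl (fun s ch => if p ch then PySem.Set.add s ch else s) s
      = (l.filter (fun c => decide (p c))).foldl PySem.Set.add s := by
  induction l generalizing s with
  | nil => rfl
  | cons c l ih =>
    simp only [List.foldl_cons, List.filter_cons]
    by_cases hc : p c
    · simp [hc, ih]
    · simp [hc, ih]

lemma pv_contains_ofList_filter (wl : List Char) (p : Char → Bool) (v : Char) (hv : p v = true) :
    (PySem.Set.ofList (wl.filter p)).contains v = wl.contains v := by
  rw [Bool.eq_iff_iff, PySem.Set.contains_iff, PySem.Set.mem_ofList, List.contains_iff_mem,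
    List.mem_filter]
  simp [hv]

lemma pv_length_ofList_filter (wl vs : List Char) (hnd : vs.Nodup) :
    (PySem.Set.ofList (wl.filter (fun c => decide (c ∈ vs)))).length
      = (vs.filter (fun v => wl.contains v)).length := by
  apply List.Perm.length_eq
  rw [List.perm_ext_iff_of_nodup (PySem.Set.nodup_ofList _) (hnd.filter _)]
  intro a
  rw [PySem.Set.mem_ofList]
  simp only [List.mem_filter, decide_eq_true_eq, List.contains_iff_mem]
  tauto

lemma pv_isEmpty_eq (l : List Char) : l.isEmpty = decide (l.length = 0) := by
  cases l <;> rfl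

lemma pv_word (word : String) : pvAWord word = pvBWord word := by
  have hitems : pvPhonemeMap.items
      = [("a", "aa"), ("e", "ee"), ("i", "ih"), ("o", "oh"), ("u", "ou"),
         ("A", "aa"), ("E", "ee"), ("I", "ih"), ("O", "oh"), ("U", "ou"),
         ("y", "ih"), ("Y", "ih")] := by decide
  unfold pvAWord pvBWord
  simp only [hitems, List.foldl_cons, List.foldl_nil, PySem.Str.isIn_eq, PySem.Str.toList_lower]
  simp only [show ("a" : String).toList = ['a'] from rfl,
    show ("e" : String).toList = ['e'] from rfl, show ("i" : String).toList = ['i'] from rfl,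
    show ("o" : String).toList = ['o'] from rfl, show ("u" : String).toList = ['u'] from rfl,
    show ("y" : String).toList = ['y'] from rfl, show ("A" : String).toList = ['A'] from rfl,
    show ("E" : String).toList = ['E'] from rfl, show ("I" : String).toList = ['I'] from rfl,
    show ("O" : String).toList = ['O'] from rfl, show ("U" : String).toList = ['U'] from rfl,
    show ("Y" : String).toList = ['Y'] from rfl]
  simp only [pv_isIn_singleton]
  simp only [pv_upper_contains_false 'A' (by decide), pv_upper_contains_false 'E' (by decide),
    pv_upper_contains_false 'I' (by decide), pv_upper_contains_false 'O' (by decide),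
    pv_upper_contains_false 'U' (by decide), pv_upper_contains_false 'Y' (by decide)]
  rw [pv_fold_filter]
  rw [show (PySem.Set.empty : PySem.Set Char) = ([] : List Char) from rfl,
    ← PySem.Set.ofList_eq_foldl]
  simp only [pvVowelPriority, List.find?, pv_isEmpty_eq]
  rw [pv_length_ofList_filter _ ['a', 'e', 'i', 'o', 'u', 'y'] (by decide)]
  simp only [List.filter_cons, List.filter_nil]
  simp only [pv_contains_ofList_filter _ (fun c => decide (c ∈ ['a', 'e', 'i', 'o', 'u', 'y'])) 'a' (by decide),
    pv_contains_ofList_filter _ (fun c => decide (c ∈ ['a', 'e', 'i', 'o', 'u', 'y'])) 'e' (by decide), pv_contains_ofList_filter _ (fun c => decide (c ∈ ['a', 'e', 'i', 'o', 'u', 'y'])) 'i' (by decide),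
    pv_contains_ofList_filter _ (fun c => decide (c ∈ ['a', 'e', 'i', 'o', 'u', 'y'])) 'o' (by decide), pv_contains_ofList_filter _ (fun c => decide (c ∈ ['a', 'e', 'i', 'o', 'u', 'y'])) 'u' (by decide),
    pv_contains_ofList_filter _ (fun c => decide (c ∈ ['a', 'e', 'i', 'o', 'u', 'y'])) 'y' (by decide)]
  generalize (PySem.Chars.lower word.toList).contains 'a' = ba
  generalize (PySem.Chars.lower word.toList).contains 'e' = be
  generalize (PySem.Chars.lower word.toList).contains 'i' = bi
  generalize (PySem.Chars.lower word.toList).contains 'o' = bo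
  generalize (PySem.Chars.lower word.toList).contains 'u' = bu
  generalize (PySem.Chars.lower word.toList).contains 'y' = by'
  revert ba be bi bo bu by'
  decide

-- ===== VERDICT (by name: the statement is the Claim_ definition above) =====
theorem text_to_phonemes_spec : Claim_equal_text_to_phonemes := by
  intro text _
  unfold Spec_text_to_phonemes text_to_phonemes text_to_phonemes_alt
  simp only [pv_word]
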